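-- pv_equiv track=rewrite | github.com/sxsun33/6.009labs | lab_minesweeper.py | all_possible_coordinates
-- ===== SOURCE A (Python) =====
-- def all_possible_coordinates(dim):
--     '''
--     A function that returns all possible coordinates in a given board dimension.
--     '''
--     if len(dim) == 1:
--         for i in range(dim[0]):
--             yield (i, )
--     else:
--         for first in range(dim[0]):
--             for rest in all_possible_coordinates(dim[1:]):
--                 yield (first, ) + rest
-- ===== SOURCE B (Python) =====
-- def all_possible_coordinates(dim):
--     '''
--     A function that returns all possible coordinates in a given board dimension.
--     '''
--     if any(d <= 0 for d in dim):
--         return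
--     coords = [()]
--     for d in reversed(dim):
--         coords = [(i,) + p for i in range(d) for p in coords]
--     yield from coords
-- ===== Notes on version B (the rewrite author's own statement) =====
-- stated objective: alternative
-- what changed: Replaces A's per-prefix recursive generator (which re-enumerates the suffix product for every outer index, slicing dim each time) with a single iterative right-to-left fold that builds the list of suffix coordinates once per dimension and yields it.
-- outside the precondition, e.g. on all_possible_coordinates([]): A raises IndexError, B returns [()]
import Mathlib
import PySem

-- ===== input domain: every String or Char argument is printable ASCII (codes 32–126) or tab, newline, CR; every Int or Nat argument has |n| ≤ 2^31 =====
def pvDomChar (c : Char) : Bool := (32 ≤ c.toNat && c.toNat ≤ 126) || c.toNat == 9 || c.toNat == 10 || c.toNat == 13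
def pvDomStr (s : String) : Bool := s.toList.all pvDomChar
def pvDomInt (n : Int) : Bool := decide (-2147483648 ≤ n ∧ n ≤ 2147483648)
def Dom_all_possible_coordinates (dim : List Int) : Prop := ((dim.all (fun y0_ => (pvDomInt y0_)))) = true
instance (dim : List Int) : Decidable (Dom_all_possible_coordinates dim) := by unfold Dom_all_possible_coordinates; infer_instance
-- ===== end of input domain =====

-- B builds the coordinate list by an iterative right-to-left fold over the dimensions instead of A's per-prefix recursion; return-value equivalence on nonempty dim.


-- ===== PORT A =====
-- A is a recursive generator; its port collects the yielded tuples in order.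
-- The [] case raises IndexError in Python (range(dim[0])) and is excluded by Pre_.
def all_possible_coordinates (dim : List Int) : List (List Int) :=
  match dim with
  | [] => []
  | d :: rest =>
    if rest = [] then
      (PySem.List.pyRange 0 d 1).map (fun i => [i])
    else
      (PySem.List.pyRange 0 d 1).flatMap (fun first =>
        (all_possible_coordinates rest).map (fun r => first :: r))

-- ===== PORT B =====
-- B: an empty board (some d <= 0) yields nothing; otherwise coords starts as [()]
-- and each dimension, taken right-to-left, prepends every index of range(d) to
-- every suffix coordinate built so far.
def all_possible_coordinates_alt (dim : List Int) : List (List Int) :=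
  if dim.any (fun d => decide (d ≤ 0)) then []
  else
    dim.reverse.foldl
      (fun coords d => (PySem.List.pyRange 0 d 1).flatMap (fun i => coords.map (fun p => i :: p)))
      [[]]

-- ===== PRECONDITION & SPEC =====
-- Pre_ excludes only dim = [], on which the Python A raises IndexError.
def Pre_all_possible_coordinates (dim : List Int) : Prop := dim ≠ []
instance (dim : List Int) : Decidable (Pre_all_possible_coordinates dim) := by unfold Pre_all_possible_coordinates; infer_instance
def pvWitness_all_possible_coordinates : List Int := [2, 3]

def Spec_all_possible_coordinates (dim : List Int) (out : List (List Int)) : Prop := out = all_possible_coordinates_alt dim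
instance (dim : List Int) (out : List (List Int)) : Decidable (Spec_all_possible_coordinates dim out) := by unfold Spec_all_possible_coordinates; infer_instance

-- ===== CLAIM (what is proved, stated in full; the proofs are below) =====
def Claim_equal_all_possible_coordinates : Prop := ∀ (dim : List Int), Dom_all_possible_coordinates dim → Pre_all_possible_coordinates dim → Spec_all_possible_coordinates dim (all_possible_coordinates dim)

-- ===== LEMMAS AND PROOFS =====

-- One fold step of B's port, named for the lemmas below.
def stepB (coords : List (List Int)) (d : Int) : List (List Int) :=
  (PySem.List.pyRange 0 d 1).flatMap (fun i => coords.map (fun p => i :: p))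

-- The unguarded fold; B's port equals it (the guard only short-circuits).
def foldB (dim : List Int) : List (List Int) := dim.reverse.foldl stepB [[]]

lemma stepB_nonpos (c : List (List Int)) (d : Int) (h : d ≤ 0) : stepB c d = [] := by
  simp only [stepB, PySem.List.pyRange_one]
  simp only [List.flatMap_eq_nil_iff, List.mem_map, List.mem_range, List.map_eq_nil_iff,
    forall_exists_index]
  intro x a ha
  exact absurd ha.1 (by omega)

lemma stepB_nil (d : Int) : stepB [] d = [] := by simp [stepB]

lemma foldl_stepB_nil (xs : List Int) : xs.foldl stepB [] = [] := by
  induction xs with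
  | nil => rfl
  | cons x t ih => simp [stepB_nil, ih]

lemma foldl_stepB_any_nil (xs : List Int) (c : List (List Int))
    (h : ∃ d ∈ xs, d ≤ 0) : xs.foldl stepB c = [] := by
  induction xs generalizing c with
  | nil => simp at h
  | cons x t ih =>
    by_cases hx : x ≤ 0
    · simp [List.foldl_cons, stepB_nonpos c x hx, foldl_stepB_nil]
    · rcases h with ⟨d, hd, hd0⟩
      rcases List.mem_cons.mp hd with rfl | hdt
      · exact absurd hd0 hx
      · exact ih _ ⟨d, hdt, hd0⟩

lemma altB_eq_foldB (dim : List Int) : all_possible_coordinates_alt dim = foldB dim := by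
  unfold all_possible_coordinates_alt foldB
  by_cases h : dim.any (fun d => decide (d ≤ 0))
  · rw [if_pos h]
    rcases List.any_eq_true.mp h with ⟨d, hd, hd0⟩
    exact (foldl_stepB_any_nil _ _ ⟨d, List.mem_reverse.mpr hd, of_decide_eq_true hd0⟩).symm
  · rw [if_neg h]; rfl

lemma foldB_cons (d : Int) (rest : List Int) :
    foldB (d :: rest) = stepB (foldB rest) d := by
  simp [foldB, List.foldl_append]

lemma portA_eq_foldB (dim : List Int) (h : dim ≠ []) :
    all_possible_coordinates dim = foldB dim := by
  induction dim with
  | nil => exact absurd rfl h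
  | cons d rest ih =>
    rw [foldB_cons]
    by_cases hr : rest = []
    · subst hr
      simp only [all_possible_coordinates, stepB, foldB,
        List.reverse_nil, List.foldl_nil, List.flatMap]
      induction (PySem.List.pyRange 0 d 1) with
      | nil => rfl
      | cons a t iht => simp_all
    · simp only [all_possible_coordinates, if_neg hr, ih hr, stepB]

-- ===== VERDICT (by name: the statement is the Claim_ definition above) =====
theorem all_possible_coordinates_spec : Claim_equal_all_possible_coordinates := by
  intro dim _ hpre
  unfold Spec_all_possible_coordinates
  rw [portA_eq_foldB dim hpre, altB_eq_foldB]
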